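-- pv_equiv track=rewrite | github.com/Saperzysta/HM-Warsztaty-2023PW | example.py | sweap_max
-- ===== SOURCE A (Python) =====
-- def sweap_max(items: list) -> list:
--     max_item = items[0]
--     max_pos = 0
--     for i in range(len(items)):
--         if max_item <= items[i]:
--             max_item = items[i]
--             max_pos = i
--     items[max_pos] = items[0]
--     items[0] = max_item
--     return items
-- ===== SOURCE B (Python) =====
-- def sweap_max(items: list) -> list:
--     max_val = max(items)
--     pos = len(items) - 1 - items[::-1].index(max_val)
--     items[pos] = items[0]
--     items[0] = max_val
--     return items
-- ===== Notes on version B (the rewrite author's own statement) =====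
-- stated objective: idiomatic
-- what changed: Replaces A's fused manual running-max/argmax index loop by the builtin max() plus a reverse-slice .index() lookup for the last occurrence, then one swap.
import Mathlib
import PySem

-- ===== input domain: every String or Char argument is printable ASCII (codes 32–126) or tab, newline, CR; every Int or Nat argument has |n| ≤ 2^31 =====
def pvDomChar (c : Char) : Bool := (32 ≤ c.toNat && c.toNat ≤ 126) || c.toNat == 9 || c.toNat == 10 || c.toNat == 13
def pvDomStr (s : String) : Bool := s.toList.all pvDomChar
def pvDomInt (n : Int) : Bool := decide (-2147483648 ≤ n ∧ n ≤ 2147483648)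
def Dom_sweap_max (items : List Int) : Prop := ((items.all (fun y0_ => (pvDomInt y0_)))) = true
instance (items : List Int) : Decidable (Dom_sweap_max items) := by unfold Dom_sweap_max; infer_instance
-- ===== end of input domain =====

-- B is the idiomatic form: builtin max plus a reverse .index() lookup of the last occurrence, then one swap;
-- equivalence is about the RETURN value only (the Python A and B both also mutate the argument list in place).

-- ===== PORT A =====
-- running max/argmax loop; '<=' makes the LAST maximal index win
def sweapStepA (items : List Int) (s : Int × Int) (i : Int) : Int × Int :=
  if s.1 ≤ PySem.List.pyGetD items i 0 then (PySem.List.pyGetD items i 0, i) else s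

def sweap_max (items : List Int) : List Int :=
  match items with
  | [] => []  -- unreachable under Pre_ (Python raises IndexError on items[0])
  | x0 :: _ =>
    let st := (PySem.List.pyRange 0 (items.length : Int) 1).foldl (sweapStepA items) (x0, 0)
    (items.set st.2.toNat x0).set 0 st.1

-- ===== PORT B =====
def sweap_max_alt (items : List Int) : List Int :=
  match PySem.List.max? items (fun y => y) with
  | none => []  -- unreachable under Pre_ (Python raises ValueError on max([]))
  | some m =>
    let pos : Int := (items.length : Int) - 1 - (((PySem.List.index? items.reverse m).getD 0 : Nat) : Int)
    (items.set pos.toNat (PySem.List.pyGetD items 0 0)).set 0 m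

-- ===== PRECONDITION & SPEC =====
-- Pre_ excludes only the empty list, on which A raises IndexError (items[0]).
def Pre_sweap_max (items : List Int) : Prop := items ≠ []
instance (items : List Int) : Decidable (Pre_sweap_max items) := by unfold Pre_sweap_max; infer_instance
def pvWitness_sweap_max : List Int := [3, 7, 7, 1]

def Spec_sweap_max (items : List Int) (out : List Int) : Prop := out = sweap_max_alt items
instance (items : List Int) (out : List Int) : Decidable (Spec_sweap_max items out) := by unfold Spec_sweap_max; infer_instance

-- ===== CLAIM (what is proved, stated in full; the proofs are below) =====
def Claim_equal_sweap_max : Prop := ∀ (items : List Int), Dom_sweap_max items → Pre_sweap_max items → Spec_sweap_max items (sweap_max items)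

-- ===== LEMMAS AND PROOFS =====

theorem sweap_loop_inv (items : List Int) (x0 : Int) (h0 : items.getD 0 0 = x0)
    (n : Nat) (h1 : 1 ≤ n) (hn : n ≤ items.length) :
    ∃ p : Nat, (PySem.List.pyRange 0 (n : Int) 1).foldl (sweapStepA items) (x0, 0)
        = (items.getD p 0, (p : Int)) ∧ p < n ∧
      (∀ j : Nat, j < n → items.getD j 0 ≤ items.getD p 0) ∧
      (∀ j : Nat, p < j → j < n → items.getD j 0 < items.getD p 0) := by
  induction n with
  | zero => omega
  | succ n ih =>
    rcases Nat.eq_or_lt_of_le h1 with h | h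
    · -- n+1 = 1
      have hn0 : n = 0 := by omega
      subst hn0
      have hr : PySem.List.pyRange 0 (((0:Nat)+1 : Nat) : Int) 1 = [0] := by
        simpa using PySem.List.pyRange_one_singleton (a := (0:Int))
      refine ⟨0, ?_, by omega, ?_, by omega⟩
      · rw [hr]
        simp only [List.foldl_cons, List.foldl_nil, sweapStepA, PySem.List.pyGetD_zero, h0]
        rw [if_pos (le_refl x0)]
        simp [← h0]
      · intro j hj
        have hj0 : j = 0 := by omega
        subst hj0
        exact le_rfl
    · have hn' : 1 ≤ n := by omega
      obtain ⟨p, hfold, hp, hle, hlt⟩ := ih hn' (by omega)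
      rw [show ((n+1:Nat):Int) = (n:Int)+1 by push_cast; ring,
          PySem.List.pyRange_one_succ_right (by positivity), List.foldl_append, hfold]
      simp only [List.foldl_cons, List.foldl_nil, sweapStepA]
      have hgd : PySem.List.pyGetD items (n:Int) 0 = items.getD n 0 := PySem.List.pyGetD_natCast ..
      rw [hgd]
      by_cases hc : items.getD p 0 ≤ items.getD n 0
      · rw [if_pos hc]
        refine ⟨n, rfl, by omega, ?_, by omega⟩
        intro j hj
        rcases Nat.lt_succ_iff_lt_or_eq.mp hj with hj | hj
        · exact le_trans (hle j hj) hc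
        · simp [hj]
      · rw [if_neg hc]
        refine ⟨p, rfl, by omega, ?_, ?_⟩
        · intro j hj
          rcases Nat.lt_succ_iff_lt_or_eq.mp hj with hj | hj
          · exact hle j hj
          · subst hj; omega
        · intro j hj1 hj2
          rcases Nat.lt_succ_iff_lt_or_eq.mp hj2 with hj | hj
          · exact hlt j hj1 hj
          · subst hj; omega

theorem sweap_main (items : List Int) (h : items ≠ []) : sweap_max items = sweap_max_alt items := by
  rcases items with _ | ⟨x0, t⟩
  · exact absurd rfl h
  set items := x0 :: t with hitems
  have hlen : 1 ≤ items.length := by simp [hitems]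
  obtain ⟨p, hfold, hp, hle, hlt⟩ :=
    sweap_loop_inv items x0 (by simp [hitems]) items.length hlen le_rfl
  set M := items.getD p 0 with hM
  have hpM : items[p]'hp = M := by rw [hM, List.getD_eq_getElem _ _ hp]
  -- B's max equals M
  have hmax : PySem.List.max? items (fun y => y) = some M := by
    rcases hmx : PySem.List.max? items (fun y => y) with _ | m
    · rw [PySem.List.max?_eq_none_iff] at hmx; exact absurd hmx h
    · have h1 : M ≤ m := PySem.List.max?_isMax hmx _ (hpM ▸ List.getElem_mem hp)
      have h2 : m ≤ M := by
        have := PySem.List.max?_mem hmx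
        obtain ⟨k, hk, hkm⟩ := List.mem_iff_getElem.mp this
        have := hle k hk
        rwa [List.getD_eq_getElem _ _ hk, hkm] at this
      exact congrArg some (le_antisymm h2 h1)
  -- last occurrence via reverse index
  have hidx : PySem.List.index? items.reverse M = some (items.length - 1 - p) := by
    rw [PySem.List.index?_eq_some_iff]
    refine ⟨(items.drop (p+1)).reverse, (items.take p).reverse, ?_, ?_, ?_⟩
    · have hdp : items.drop p = M :: items.drop (p+1) := by
        rw [← hpM, List.getElem_cons_drop]
      conv_lhs => rw [← List.take_append_drop p items, hdp]
      simp
    · simp; omega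
    · intro hmem
      rw [List.mem_reverse] at hmem
      obtain ⟨k, hk, hkm⟩ := List.mem_iff_getElem.mp hmem
      rw [List.getElem_drop] at hkm
      have hlt' := hlt (p+1+k) (by omega) (by simp at hk; omega)
      rw [List.getD_eq_getElem _ _ (by simp at hk; omega)] at hlt'
      omega
  -- assemble
  show sweap_max items = sweap_max_alt items
  rw [hitems]
  simp only [sweap_max, sweap_max_alt]
  rw [← hitems, hmax]
  simp only [hfold, hidx]
  have hpos : ((items.length : Int) - 1 - ((((some (items.length - 1 - p)).getD 0 : Nat)) : Int)).toNat = p := by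
    simp only [Option.getD_some]
    omega
  rw [hpos]
  have : ((p : Int)).toNat = p := Int.toNat_natCast p
  rw [this, PySem.List.pyGetD_zero]
  rfl

-- ===== VERDICT (by name: the statement is the Claim_ definition above) =====
theorem sweap_max_spec : Claim_equal_sweap_max := by
  intro items _ hpre
  unfold Spec_sweap_max
  exact sweap_main items hpre
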